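-- pv_equiv track=rewrite | github.com/jiji7879/Project-Euler-2 | p031-p040/p036.py | decimal_binary_palindromes
-- ===== SOURCE A (Python) =====
-- def decimal_binary_palindromes(max_num: int) -> list:
--     palindrome_list = []
--     for i in range(1, max_num+1):
--         if str(i) == str(i)[::-1]:
--             binary = bin(i)[2:]
--             if binary == binary[::-1]:
--                 palindrome_list.append(i)
--     return palindrome_list
-- ===== SOURCE B (Python) =====
-- def _bin_pal(p):
--     r, t = 0, p
--     while t > 0:
--         r = r * 2 + t % 2
--         t //= 2
--     return r == p
--
--
-- def decimal_binary_palindromes(max_num: int) -> list: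
--     # Generate decimal palindromes in ascending order (by mirroring each
--     # half), keep those <= max_num that are also binary palindromes.
--     res = []
--     length = 1
--     while 10 ** (length - 1) <= max_num:
--         half = (length + 1) // 2
--         for h in range(10 ** (half - 1), 10 ** half):
--             t = h // 10 if length % 2 == 1 else h
--             p = h
--             while t > 0:
--                 p = p * 10 + t % 10
--                 t //= 10
--             if p > max_num:
--                 break
--             if _bin_pal(p):
--                 res.append(p)
--         length += 1
--     return res
-- ===== Notes on version B (the rewrite author's own statement) =====
-- stated objective: faster
-- what changed: Instead of scanning every integer 1..max_num and string-testing both representations, B generates the decimal palindromes directly in ascending order (mirroring each half-number, length by length) and keeps those that are binary palindromes by arithmetic bit reversal.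
import Mathlib
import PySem

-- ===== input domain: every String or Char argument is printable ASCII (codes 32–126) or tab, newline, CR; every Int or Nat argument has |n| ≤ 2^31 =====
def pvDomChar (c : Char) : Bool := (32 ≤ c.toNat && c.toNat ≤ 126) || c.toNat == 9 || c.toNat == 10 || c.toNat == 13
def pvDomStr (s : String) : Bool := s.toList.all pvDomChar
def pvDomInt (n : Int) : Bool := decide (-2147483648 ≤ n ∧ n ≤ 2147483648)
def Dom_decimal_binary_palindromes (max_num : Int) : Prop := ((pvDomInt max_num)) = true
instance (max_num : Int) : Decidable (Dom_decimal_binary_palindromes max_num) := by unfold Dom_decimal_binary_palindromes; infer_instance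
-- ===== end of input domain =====

-- B is faster: it generates decimal palindromes directly (mirroring each half)
-- instead of scanning every integer up to max_num; return values proved equal.

-- ===== PORT A =====
-- literal port of A: scan i = 1..max_num, keep i when str(i) and bin(i)[2:] are palindromes
def decimal_binary_palindromes (max_num : Int) : List Int :=
  (PySem.List.pyRange 1 (max_num + 1) 1).foldl
    (fun acc i =>
      let s := PySem.Int.toStr i
      if PySem.Str.slice? s none none (-1) = some s then
        let binary := PySem.Str.slice (PySem.Int.pyBin i) (some 2) none
        if PySem.Str.slice? binary none none (-1) = some binary then
          acc ++ [i]
        else acc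
      else acc)
    []

-- ===== PORT B =====
-- port of Source B's _bin_pal while loop: r, t = 0, p; while t > 0: r = r*2 + t%2; t //= 2
def binPalLoop (r t : Int) : Int :=
  if 0 < t then
    binPalLoop (r * 2 + PySem.Int.mod t 2) (PySem.Int.floordiv t 2)
  else r
termination_by t.toNat
decreasing_by
  have h2 : PySem.Int.floordiv t 2 = t / 2 := PySem.Int.floordiv_eq_ediv_of_pos (by omega)
  omega

def binPal (p : Int) : Bool := binPalLoop 0 p == p

-- port of Source B's mirroring while loop: while t > 0: p = p*10 + t%10; t //= 10
def mirrorLoop (p t : Int) : Int :=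
  if 0 < t then
    mirrorLoop (p * 10 + PySem.Int.mod t 10) (PySem.Int.floordiv t 10)
  else p
termination_by t.toNat
decreasing_by
  have h2 : PySem.Int.floordiv t 10 = t / 10 := PySem.Int.floordiv_eq_ediv_of_pos (by omega)
  omega

-- port of Source B's inner `for h in range(...)` with its break
def innerFor (max_num L hi h : Int) (acc : List Int) : List Int :=
  if h < hi then
    let t := if PySem.Int.mod L 2 = 1 then PySem.Int.floordiv h 10 else h
    let p := mirrorLoop h t
    if max_num < p then acc
    else innerFor max_num L hi (h + 1) (if binPal p then acc ++ [p] else acc)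
  else acc
termination_by (hi - h).toNat
decreasing_by omega

-- port of Source B's outer `while 10 ** (length - 1) <= max_num`
def outerWhile (max_num L : Int) (acc : List Int) : List Int :=
  if (10 : Int) ^ (L - 1).toNat ≤ max_num then
    let half := PySem.Int.floordiv (L + 1) 2
    outerWhile max_num (L + 1)
      (innerFor max_num L ((10 : Int) ^ half.toNat) ((10 : Int) ^ (half - 1).toNat) acc)
  else acc
termination_by (max_num + 1 - L).toNat
decreasing_by
  rename_i hcond
  rcases le_or_gt L 1 with hL | hL
  · have h1 : (1 : Int) ≤ max_num := by
      have : (L - 1).toNat = 0 := by omega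
      rw [this] at hcond; simpa using hcond
    omega
  · have hk : ((L - 1).toNat : Int) = L - 1 := by omega
    have h2 : ((L - 1).toNat : Int) < (10 : Int) ^ (L - 1).toNat := by
      have := Nat.lt_pow_self (a := 10) (n := (L - 1).toNat) (by norm_num)
      exact_mod_cast this
    omega

def decimal_binary_palindromes_alt (max_num : Int) : List Int :=
  outerWhile max_num 1 []

-- ===== PRECONDITION & SPEC =====
def Spec_decimal_binary_palindromes (max_num : Int) (out : List Int) : Prop := out = decimal_binary_palindromes_alt max_num
instance (max_num : Int) (out : List Int) : Decidable (Spec_decimal_binary_palindromes max_num out) := by unfold Spec_decimal_binary_palindromes; infer_instance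

-- ===== CLAIM (what is proved, stated in full; the proofs are below) =====
def Claim_equal_decimal_binary_palindromes : Prop := ∀ (max_num : Int), Dom_decimal_binary_palindromes max_num → Spec_decimal_binary_palindromes max_num (decimal_binary_palindromes max_num)

-- ===== LEMMAS AND PROOFS =====

-- `n` is a palindrome in base `b` (little-endian digit lists)
def pal (b n : ℕ) : Prop := (Nat.digits b n).reverse = Nat.digits b n

theorem toDigitsCore_eq (b : ℕ) (hb : 1 < b) :
    ∀ (f n : ℕ) (acc : List Char), 0 < n → n < f →
      Nat.toDigitsCore b f n acc = ((Nat.digits b n).map Nat.digitChar).reverse ++ acc := by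
  intro f
  induction f with
  | zero => intro n acc h1 h2; omega
  | succ f ih =>
    intro n acc h1 h2
    rw [Nat.toDigitsCore]
    by_cases hz : n / b = 0
    · simp only [hz, if_pos]
      rw [Nat.digits_def' hb h1, hz]
      simp
    · simp only [hz]
      rw [ih (n / b) _ (Nat.pos_of_ne_zero hz) (by
        have := Nat.div_lt_self h1 hb
        omega)]
      rw [Nat.digits_def' hb h1]
      simp


theorem toDigits_eq (b n : ℕ) (hb : 1 < b) (hn : 0 < n) :
    Nat.toDigits b n = ((Nat.digits b n).map Nat.digitChar).reverse := by
  rw [Nat.toDigits, toDigitsCore_eq b hb (n+1) n [] hn (by omega)]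
  simp

theorem digitChar_injOn : ∀ x < 16, ∀ y < 16, Nat.digitChar x = Nat.digitChar y → x = y := by decide


theorem map_eq_map_of_injOn {α β : Type} (f : α → β) :
    ∀ (l1 l2 : List α), (∀ x ∈ l1, ∀ y ∈ l2, f x = f y → x = y) →
      l1.map f = l2.map f → l1 = l2 := by
  intro l1
  induction l1 with
  | nil => intro l2 _ h; cases l2 <;> simp_all
  | cons a l ih =>
    intro l2 hinj h
    cases l2 with
    | nil => simp at h
    | cons b l2' =>
      simp only [List.map_cons, List.cons.injEq] at h
      have hab : a = b := hinj a (by simp) b (by simp) h.1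
      subst hab
      rw [ih l2' (fun x hx y hy => hinj x (by simp [hx]) y (by simp [hy])) h.2]


theorem pal_map_digitChar_iff (l : List ℕ) (hl : ∀ x ∈ l, x < 16) :
    (l.map Nat.digitChar).reverse = l.map Nat.digitChar ↔ l.reverse = l := by
  constructor
  · intro h
    rw [← List.map_reverse] at h
    exact map_eq_map_of_injOn _ _ _
      (fun x hx y hy => digitChar_injOn x (hl x (List.mem_reverse.mp hx)) y (hl y hy)) h
  · intro h
    rw [← List.map_reverse, h]

theorem toDigits_pal_iff (b m : ℕ) (hb : 1 < b) (hb16 : b ≤ 16) (hm : 0 < m) :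
    ((Nat.toDigits b m).reverse = Nat.toDigits b m) ↔ pal b m := by
  rw [toDigits_eq b m hb hm, List.reverse_reverse, pal]
  constructor
  · intro h
    exact (pal_map_digitChar_iff _ (fun x hx => lt_of_lt_of_le (Nat.digits_lt_base hb hx) hb16)).mp h.symm
  · intro h
    exact ((pal_map_digitChar_iff _ (fun x hx => lt_of_lt_of_le (Nat.digits_lt_base hb hx) hb16)).mpr h).symm

def condA (i : Int) : Bool :=
  (decide (PySem.Str.slice? (PySem.Int.toStr i) none none (-1) = some (PySem.Int.toStr i))) &&
  (decide (PySem.Str.slice? (PySem.Str.slice (PySem.Int.pyBin i) (some 2) none) none none (-1)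
      = some (PySem.Str.slice (PySem.Int.pyBin i) (some 2) none)))

theorem A_eq_filter (max_num : Int) :
    decimal_binary_palindromes max_num
      = (PySem.List.pyRange 1 (max_num + 1) 1).filter condA := by
  rw [decimal_binary_palindromes]
  have hbody : (fun (acc : List Int) (i : Int) =>
      let s := PySem.Int.toStr i
      if PySem.Str.slice? s none none (-1) = some s then
        let binary := PySem.Str.slice (PySem.Int.pyBin i) (some 2) none
        if PySem.Str.slice? binary none none (-1) = some binary then
          acc ++ [i]
        else acc
      else acc)
      = (fun acc i => if condA i then acc ++ [(id i)] else acc) := by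
    funext acc i
    simp only [condA, id, Bool.and_eq_true, decide_eq_true_eq]
    split_ifs <;> simp_all
  rw [hbody, PySem.List.foldl_append_if condA id, List.map_id]
  simp


theorem strpal_iff (s : String) :
    (PySem.Str.slice? s none none (-1) = some s) ↔ s.toList.reverse = s.toList := by
  rw [PySem.Str.slice?_none_none_neg_one]
  constructor
  · intro h
    have := congrArg String.toList (Option.some.inj h)
    simpa using this
  · intro h; rw [h]; simp [String.ofList_toList]

theorem binary_toList (i : Int) (hi : 1 ≤ i) :
    (PySem.Str.slice (PySem.Int.pyBin i) (some 2) none).toList = Nat.toDigits 2 i.toNat := by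
  simp only [PySem.Str.slice, PySem.Int.pyBin, String.toList_ofList, PySem.Chars.slice]
  rw [show ((2:Int)) = ((2:Nat):Int) by norm_num, PySem.List.slice_from_natCast]
  rw [PySem.Int.toBinChars0b, if_neg (by omega)]
  simp

theorem condA_iff (i : Int) (hi : 1 ≤ i) :
    condA i = true ↔ (pal 10 i.toNat ∧ pal 2 i.toNat) := by
  have hm : 0 < i.toNat := by omega
  have h1 : (PySem.Int.toStr i).toList = Nat.toDigits 10 i.toNat := by
    simp only [PySem.Int.toStr, PySem.Int.toChars, String.toList_ofList, if_neg (by omega : ¬ i < 0)]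
  rw [condA, Bool.and_eq_true, decide_eq_true_eq, decide_eq_true_eq, strpal_iff, strpal_iff,
    h1, binary_toList i hi, toDigits_pal_iff 10 _ (by norm_num) (by norm_num) hm,
    toDigits_pal_iff 2 _ (by norm_num) (by norm_num) hm]

theorem ofDigits_rev_eq_iff (b m : ℕ) (hb : 1 < b) (hm : 0 < m) :
    (Nat.ofDigits b (Nat.digits b m).reverse : ℕ) = m ↔ pal b m := by
  constructor
  · intro h
    by_cases hz : m % b = 0
    · exfalso
      rw [Nat.digits_def' hb hm, hz] at h
      rw [List.reverse_cons, Nat.ofDigits_append] at h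
      simp only [Nat.ofDigits_cons, Nat.ofDigits_nil] at h
      have hlt : (Nat.ofDigits b (Nat.digits b (m / b)).reverse : ℕ) < b ^ (Nat.digits b (m / b)).length := by
        have := Nat.ofDigits_lt_base_pow_length (b := b) (l := (Nat.digits b (m / b)).reverse) hb
          (fun x hx => Nat.digits_lt_base hb (List.mem_reverse.mp hx))
        simpa using this
      have hge : b ^ (Nat.digits b (m / b)).length ≤ m := by
        have h1 := Nat.base_pow_length_digits_le b m hb (by omega)
        rw [Nat.digits_def' hb hm, List.length_cons, pow_succ] at h1
        rw [mul_comm] at h1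
        exact Nat.le_of_mul_le_mul_left h1 (by omega)
      omega
    · have hne : Nat.digits b m ≠ [] := Nat.digits_ne_nil_iff_ne_zero.mpr (by omega)
      have hrevne : (Nat.digits b m).reverse ≠ [] := by simpa using hne
      have hdig := Nat.digits_ofDigits b hb (Nat.digits b m).reverse
        (fun x hx => Nat.digits_lt_base hb (List.mem_reverse.mp hx))
        (by
          intro h'
          rw [List.getLast_reverse]
          simpa [Nat.digits_def' hb hm] using hz)
      rw [h] at hdig
      exact hdig.symm
  · intro h
    rw [pal] at h
    rw [h, Nat.ofDigits_digits]

theorem mirrorLoop_eq (m : ℕ) : ∀ (a : Int),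
    mirrorLoop a (m : Int)
      = a * (10 : Int) ^ (Nat.digits 10 m).length
        + ((Nat.ofDigits 10 (Nat.digits 10 m).reverse : ℕ) : Int) := by
  induction m using Nat.strong_induction_on with
  | _ m ih =>
    intro a
    rcases Nat.eq_zero_or_pos m with hm | hm
    · subst hm; rw [mirrorLoop]; simp
    · rw [mirrorLoop, if_pos (by exact_mod_cast hm)]
      have hmod : PySem.Int.mod (m : Int) 10 = ((m % 10 : ℕ) : Int) := by
        exact_mod_cast PySem.Int.mod_natCast m 10
      have hdiv : PySem.Int.floordiv (m : Int) 10 = ((m / 10 : ℕ) : Int) := by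
        exact_mod_cast PySem.Int.floordiv_natCast m 10
      rw [hmod, hdiv, ih (m / 10) (Nat.div_lt_self hm (by norm_num))]
      rw [Nat.digits_def' (by norm_num : (1:ℕ) < 10) hm]
      simp only [List.length_cons, List.reverse_cons, Nat.ofDigits_append, Nat.ofDigits_cons,
        Nat.ofDigits_nil, List.length_reverse]
      push_cast
      ring

def tOf (L h : ℕ) : ℕ := if L % 2 = 1 then h / 10 else h

def pval (L h : ℕ) : ℕ :=
  Nat.ofDigits 10 ((Nat.digits 10 (tOf L h)).reverse ++ Nat.digits 10 h)

theorem digits_pval (L h : ℕ) (hh : 0 < h) :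
    Nat.digits 10 (pval L h) = (Nat.digits 10 (tOf L h)).reverse ++ Nat.digits 10 h := by
  apply Nat.digits_ofDigits 10 (by norm_num)
  · intro x hx
    rcases List.mem_append.mp hx with hx | hx
    · exact Nat.digits_lt_base (by norm_num) (List.mem_reverse.mp hx)
    · exact Nat.digits_lt_base (by norm_num) hx
  · intro hne
    rw [List.getLast_append_right (Nat.digits_ne_nil_iff_ne_zero.mpr (by omega))]
    exact Nat.getLast_digit_ne_zero 10 (by omega)


theorem digits_tOf (L h : ℕ) (hh : 0 < h) :
    Nat.digits 10 (tOf L h) = if L % 2 = 1 then (Nat.digits 10 h).tail else Nat.digits 10 h := by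
  rw [tOf]
  split_ifs
  · rw [Nat.digits_def' (by norm_num : (1:ℕ) < 10) hh]; simp
  · rfl


theorem pal_pval (L h : ℕ) (hh : 0 < h) : pal 10 (pval L h) := by
  rw [pal, digits_pval L h hh, digits_tOf L h hh]
  split_ifs
  · conv_lhs => rw [Nat.digits_def' (by norm_num : (1:ℕ) < 10) hh]
    conv_rhs => rw [Nat.digits_def' (by norm_num : (1:ℕ) < 10) hh]
    simp [List.reverse_append]
  · simp [List.reverse_append]


theorem len_digits_eq_of_bounds (n k : ℕ) (hk : 0 < k) (h1 : 10 ^ (k - 1) ≤ n) (h2 : n < 10 ^ k) :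
    (Nat.digits 10 n).length = k := by
  have hp : 0 < (10:ℕ) ^ (k - 1) := by positivity
  have hn : n ≠ 0 := by omega
  rw [Nat.length_digits 10 n (by norm_num) hn]
  have := Nat.log_eq_of_pow_le_of_lt_pow h1 (by
    have : k - 1 + 1 = k := by omega
    rw [this]; exact h2)
  omega


theorem base_pow_pred_le (b n : ℕ) (hb : 1 < b) (hn : 0 < n) :
    b ^ ((Nat.digits b n).length - 1) ≤ n := by
  have h1 := Nat.base_pow_length_digits_le b n hb (by omega)
  have hlen : 0 < (Nat.digits b n).length := by
    simp [List.length_pos_iff, Nat.digits_ne_nil_iff_ne_zero.mpr (by omega : n ≠ 0)]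
  have h2 : b ^ ((Nat.digits b n).length - 1) * b ≤ b * n := by
    rw [← pow_succ]
    have : (Nat.digits b n).length - 1 + 1 = (Nat.digits b n).length := by omega
    rw [this]; exact h1
  rw [mul_comm] at h2
  exact Nat.le_of_mul_le_mul_left h2 (by omega)

theorem len_tOf (L h : ℕ) (hL : 0 < L)
    (hlo : 10 ^ ((L + 1) / 2 - 1) ≤ h) (hhi : h < 10 ^ ((L + 1) / 2)) :
    (Nat.digits 10 (tOf L h)).length = L - (L + 1) / 2 := by
  have hh : 0 < h := by
    have : 0 < (10:ℕ) ^ ((L + 1) / 2 - 1) := by positivity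
    omega
  have hlenH : (Nat.digits 10 h).length = (L + 1) / 2 :=
    len_digits_eq_of_bounds h _ (by omega) hlo hhi
  rw [digits_tOf L h hh]
  split_ifs with hodd
  · rw [List.length_tail, hlenH]; omega
  · rw [hlenH]; omega


theorem len_pval (L h : ℕ) (hL : 0 < L)
    (hlo : 10 ^ ((L + 1) / 2 - 1) ≤ h) (hhi : h < 10 ^ ((L + 1) / 2)) :
    (Nat.digits 10 (pval L h)).length = L := by
  have hh : 0 < h := by
    have : 0 < (10:ℕ) ^ ((L + 1) / 2 - 1) := by positivity
    omega
  have hlenH : (Nat.digits 10 h).length = (L + 1) / 2 :=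
    len_digits_eq_of_bounds h _ (by omega) hlo hhi
  rw [digits_pval L h hh, List.length_append, List.length_reverse,
    len_tOf L h hL hlo hhi, hlenH]
  omega


theorem pval_pos (L h : ℕ) (hh : 0 < h) : 0 < pval L h := by
  by_contra hz
  have : pval L h = 0 := by omega
  have hd := digits_pval L h hh
  rw [this] at hd
  have : Nat.digits 10 h ≠ [] := Nat.digits_ne_nil_iff_ne_zero.mpr (by omega)
  simp only [Nat.digits_zero] at hd
  exact this (List.append_eq_nil_iff.mp hd.symm).2


theorem bounds_pval (L h : ℕ) (hL : 0 < L)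
    (hlo : 10 ^ ((L + 1) / 2 - 1) ≤ h) (hhi : h < 10 ^ ((L + 1) / 2)) :
    10 ^ (L - 1) ≤ pval L h ∧ pval L h < 10 ^ L := by
  have hh : 0 < h := by
    have : 0 < (10:ℕ) ^ ((L + 1) / 2 - 1) := by positivity
    omega
  have hlen := len_pval L h hL hlo hhi
  constructor
  · have := base_pow_pred_le 10 (pval L h) (by norm_num) (pval_pos L h hh)
    rwa [hlen] at this
  · have := Nat.lt_base_pow_length_digits (b := 10) (m := pval L h) (by norm_num)
    rwa [hlen] at this


theorem pval_decomp (L h : ℕ) :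
    pval L h = Nat.ofDigits 10 (Nat.digits 10 (tOf L h)).reverse
      + 10 ^ (Nat.digits 10 (tOf L h)).length * h := by
  rw [pval, Nat.ofDigits_append, List.length_reverse, Nat.ofDigits_digits]


theorem mono_pval (L h1 h2 : ℕ) (hL : 0 < L)
    (hlo1 : 10 ^ ((L + 1) / 2 - 1) ≤ h1) (hhi1 : h1 < 10 ^ ((L + 1) / 2))
    (hlo2 : 10 ^ ((L + 1) / 2 - 1) ≤ h2) (hhi2 : h2 < 10 ^ ((L + 1) / 2))
    (hlt : h1 < h2) : pval L h1 < pval L h2 := by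
  have hh1 : 0 < h1 := by
    have : 0 < (10:ℕ) ^ ((L + 1) / 2 - 1) := by positivity
    omega
  have hh2 : 0 < h2 := by omega
  have hl1 := len_tOf L h1 hL hlo1 hhi1
  have hl2 := len_tOf L h2 hL hlo2 hhi2
  have hr1 : Nat.ofDigits 10 (Nat.digits 10 (tOf L h1)).reverse < 10 ^ (Nat.digits 10 (tOf L h1)).length := by
    have := Nat.ofDigits_lt_base_pow_length (b := 10) (l := (Nat.digits 10 (tOf L h1)).reverse)
      (by norm_num) (fun x hx => Nat.digits_lt_base (by norm_num) (List.mem_reverse.mp hx))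
    simpa using this
  rw [pval_decomp L h1, pval_decomp L h2, hl1, hl2] at *
  have hr2 : 0 ≤ Nat.ofDigits 10 (Nat.digits 10 (tOf L h2)).reverse := Nat.zero_le _
  nlinarith [pow_pos (show 0 < 10 by norm_num) (L - (L + 1) / 2)]

theorem surj_pval (x : ℕ) (hx : 0 < x) (hpal : pal 10 x) :
    10 ^ (((Nat.digits 10 x).length + 1) / 2 - 1)
        ≤ Nat.ofDigits 10 ((Nat.digits 10 x).drop ((Nat.digits 10 x).length - ((Nat.digits 10 x).length + 1) / 2))
      ∧ Nat.ofDigits 10 ((Nat.digits 10 x).drop ((Nat.digits 10 x).length - ((Nat.digits 10 x).length + 1) / 2))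
          < 10 ^ (((Nat.digits 10 x).length + 1) / 2)
      ∧ pval (Nat.digits 10 x).length
          (Nat.ofDigits 10 ((Nat.digits 10 x).drop ((Nat.digits 10 x).length - ((Nat.digits 10 x).length + 1) / 2))) = x := by
  set D := Nat.digits 10 x with hDdef
  set L := D.length with hLdef
  set k := L - (L + 1) / 2 with hkdef
  set h := Nat.ofDigits 10 (D.drop k) with hhdef
  have hDne : D ≠ [] := Nat.digits_ne_nil_iff_ne_zero.mpr (by omega)
  have hLpos : 0 < L := List.length_pos_iff.mpr hDne
  have hkL : k < L := by omega
  have hdropne : D.drop k ≠ [] := by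
    intro hc
    have := congrArg List.length hc
    simp at this
    omega
  have hdigh : Nat.digits 10 h = D.drop k := by
    apply Nat.digits_ofDigits 10 (by norm_num)
    · intro x hx
      exact Nat.digits_lt_base (by norm_num) (List.mem_of_mem_drop hx)
    · intro h'
      rw [List.getLast_drop]
      exact Nat.getLast_digit_ne_zero 10 (by omega)
  have hlenh : (Nat.digits 10 h).length = (L + 1) / 2 := by
    rw [hdigh, List.length_drop]; omega
  have hhpos : 0 < h := by
    by_contra hc
    have : h = 0 := by omega
    rw [this] at hdigh
    simp only [Nat.digits_zero] at hdigh
    exact hdropne hdigh.symm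
  refine ⟨?_, ?_, ?_⟩
  · have := base_pow_pred_le 10 h (by norm_num) hhpos
    rwa [hlenh] at this
  · have := Nat.lt_base_pow_length_digits (b := 10) (m := h) (by norm_num)
    rwa [hlenh] at this
  · have hT : Nat.digits 10 (tOf L h) = D.drop (if L % 2 = 1 then k + 1 else k) := by
      rw [digits_tOf L h hhpos, hdigh]
      split_ifs
      · rw [List.tail_drop]
      · rfl
    have hrev : (Nat.digits 10 (tOf L h)).reverse = D.take k := by
      rw [hT]
      have hj : L - (if L % 2 = 1 then k + 1 else k) = k := by
        split_ifs <;> omega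
      rw [List.reverse_drop, hpal, ← hLdef, hj]
    rw [pval, hrev, hdigh, List.take_append_drop, hDdef, Nat.ofDigits_digits]

theorem binPalLoop_eq (m : ℕ) : ∀ (a : Int),
    binPalLoop a (m : Int)
      = a * (2 : Int) ^ (Nat.digits 2 m).length
        + ((Nat.ofDigits 2 (Nat.digits 2 m).reverse : ℕ) : Int) := by
  induction m using Nat.strong_induction_on with
  | _ m ih =>
    intro a
    rcases Nat.eq_zero_or_pos m with hm | hm
    · subst hm; rw [binPalLoop]; simp
    · rw [binPalLoop, if_pos (by exact_mod_cast hm)]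
      have hmod : PySem.Int.mod (m : Int) 2 = ((m % 2 : ℕ) : Int) := by
        exact_mod_cast PySem.Int.mod_natCast m 2
      have hdiv : PySem.Int.floordiv (m : Int) 2 = ((m / 2 : ℕ) : Int) := by
        exact_mod_cast PySem.Int.floordiv_natCast m 2
      rw [hmod, hdiv, ih (m / 2) (Nat.div_lt_self hm (by norm_num))]
      rw [Nat.digits_def' (by norm_num : (1:ℕ) < 2) hm]
      simp only [List.length_cons, List.reverse_cons, Nat.ofDigits_append, Nat.ofDigits_cons,
        Nat.ofDigits_nil, List.length_reverse]
      push_cast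
      ring


theorem binPal_iff (p : Int) (hp : 1 ≤ p) : binPal p = true ↔ pal 2 p.toNat := by
  have hcast : ((p.toNat : ℕ) : Int) = p := by omega
  rw [binPal, beq_iff_eq, ← hcast, binPalLoop_eq p.toNat 0]
  simp only [zero_mul, zero_add]
  rw [Int.natCast_inj]
  exact ofDigits_rev_eq_iff 2 p.toNat (by norm_num) (by omega)

def pfunI (L h : Int) : Int :=
  mirrorLoop h (if PySem.Int.mod L 2 = 1 then PySem.Int.floordiv h 10 else h)


theorem pfunI_eq (L h : Int) (hL : 1 ≤ L) (hh : 1 ≤ h) :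
    pfunI L h = (pval L.toNat h.toNat : Int) := by
  have hcastL : ((L.toNat : ℕ) : Int) = L := by omega
  have hcasth : ((h.toNat : ℕ) : Int) = h := by omega
  have hmod : PySem.Int.mod L 2 = ((L.toNat % 2 : ℕ) : Int) := by
    rw [← hcastL]; exact_mod_cast PySem.Int.mod_natCast L.toNat 2
  have hdiv : PySem.Int.floordiv h 10 = ((h.toNat / 10 : ℕ) : Int) := by
    rw [← hcasth]; exact_mod_cast PySem.Int.floordiv_natCast h.toNat 10
  have hcond : (PySem.Int.mod L 2 = 1) ↔ (L.toNat % 2 = 1) := by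
    rw [hmod]; omega
  have htof : (if PySem.Int.mod L 2 = 1 then PySem.Int.floordiv h 10 else h)
      = ((tOf L.toNat h.toNat : ℕ) : Int) := by
    rw [tOf]
    split_ifs with h1 h2 h2
    · rw [hdiv]
    · exact absurd (hcond.mp h1) h2
    · exact absurd (hcond.mpr h2) h1
    · rw [hcasth]
  rw [pfunI, htof, ← hcasth, mirrorLoop_eq, hcasth,
    pval_decomp L.toNat h.toNat]
  push_cast
  rw [hcasth]
  ring


theorem monoI (L g1 g2 : Int) (hL : 1 ≤ L)
    (h1 : (10:Int) ^ ((L.toNat + 1) / 2 - 1) ≤ g1) (hlt : g1 < g2)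
    (h2 : g2 < (10:Int) ^ ((L.toNat + 1) / 2)) :
    pfunI L g1 < pfunI L g2 := by
  have hc1 : ((10 ^ ((L.toNat + 1) / 2 - 1) : ℕ) : Int) = (10:Int) ^ ((L.toNat + 1) / 2 - 1) := by
    push_cast; ring
  have hc2 : ((10 ^ ((L.toNat + 1) / 2) : ℕ) : Int) = (10:Int) ^ ((L.toNat + 1) / 2) := by
    push_cast; ring
  have hpow : (1:Int) ≤ (10:Int) ^ ((L.toNat + 1) / 2 - 1) := one_le_pow₀ (by norm_num)
  have hg1 : 1 ≤ g1 := le_trans hpow h1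
  have hg2 : 1 ≤ g2 := by omega
  rw [pfunI_eq L g1 hL hg1, pfunI_eq L g2 hL hg2]
  have := mono_pval L.toNat g1.toNat g2.toNat (by omega)
    (by omega) (by omega) (by omega) (by omega) (by omega)
  omega


theorem boundsI (L g : Int) (hL : 1 ≤ L)
    (h1 : (10:Int) ^ ((L.toNat + 1) / 2 - 1) ≤ g)
    (h2 : g < (10:Int) ^ ((L.toNat + 1) / 2)) :
    (10:Int) ^ (L.toNat - 1) ≤ pfunI L g ∧ pfunI L g < (10:Int) ^ L.toNat := by
  have hc1 : ((10 ^ ((L.toNat + 1) / 2 - 1) : ℕ) : Int) = (10:Int) ^ ((L.toNat + 1) / 2 - 1) := by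
    push_cast; ring
  have hc2 : ((10 ^ ((L.toNat + 1) / 2) : ℕ) : Int) = (10:Int) ^ ((L.toNat + 1) / 2) := by
    push_cast; ring
  have hc3 : ((10 ^ (L.toNat - 1) : ℕ) : Int) = (10:Int) ^ (L.toNat - 1) := by push_cast; ring
  have hc4 : ((10 ^ L.toNat : ℕ) : Int) = (10:Int) ^ L.toNat := by push_cast; ring
  have hpow : (1:Int) ≤ (10:Int) ^ ((L.toNat + 1) / 2 - 1) := one_le_pow₀ (by norm_num)
  have hg : 1 ≤ g := le_trans hpow h1
  rw [pfunI_eq L g hL hg]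
  have := bounds_pval L.toNat g.toNat (by omega) (by omega) (by omega)
  omega

theorem innerFor_spec (max_num L hi : Int) (hL : 1 ≤ L)
    (hhi : hi ≤ (10:Int) ^ ((L.toNat + 1) / 2)) :
    ∀ (n : ℕ) (h : Int) (acc : List Int),
      (hi - h).toNat ≤ n →
      (10:Int) ^ ((L.toNat + 1) / 2 - 1) ≤ h →
      List.Pairwise (· < ·) acc →
      (∀ a ∈ acc, ∀ g : Int, h ≤ g → g < hi → a < pfunI L g) →
      List.Pairwise (· < ·) (innerFor max_num L hi h acc) ∧
      (∀ x, x ∈ innerFor max_num L hi h acc ↔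
        x ∈ acc ∨ ∃ g : Int, h ≤ g ∧ g < hi ∧ pfunI L g ≤ max_num ∧
          binPal (pfunI L g) = true ∧ x = pfunI L g) := by
  intro n
  induction n with
  | zero =>
    intro h acc hn hlo hpw hsep
    have hge : hi ≤ h := by omega
    rw [innerFor, if_neg (by omega)]
    exact ⟨hpw, fun x => ⟨fun hx => Or.inl hx, fun hx => by
      rcases hx with hx | ⟨g, hg1, hg2, _⟩
      · exact hx
      · omega⟩⟩
  | succ n ih =>
    intro h acc hn hlo hpw hsep
    by_cases hcond : h < hi
    · rw [innerFor, if_pos hcond]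
      simp only []
      have hp : mirrorLoop h (if PySem.Int.mod L 2 = 1 then PySem.Int.floordiv h 10 else h)
          = pfunI L h := rfl
      rw [hp]
      by_cases hbig : max_num < pfunI L h
      · rw [if_pos hbig]
        refine ⟨hpw, fun x => ⟨fun hx => Or.inl hx, fun hx => ?_⟩⟩
        rcases hx with hx | ⟨g, hg1, hg2, hg3, _, _⟩
        · exact hx
        · exfalso
          rcases eq_or_lt_of_le hg1 with he | hlt'
          · subst he; omega
          · have := monoI L h g hL hlo hlt' (by omega)
            omega
      · rw [if_neg hbig]
        have hacc' : List.Pairwise (· < ·) (if binPal (pfunI L h) then acc ++ [pfunI L h] else acc) := by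
          split_ifs
          · rw [List.pairwise_append]
            exact ⟨hpw, List.pairwise_singleton _ _,
              fun a ha b hb => by rw [List.mem_singleton] at hb; subst hb
                                  exact hsep a ha h le_rfl hcond⟩
          · exact hpw
        have hsep' : ∀ a ∈ (if binPal (pfunI L h) then acc ++ [pfunI L h] else acc),
            ∀ g : Int, h + 1 ≤ g → g < hi → a < pfunI L g := by
          intro a ha g hg1 hg2
          have hmono := monoI L h g hL hlo (by omega) (by omega)
          split_ifs at ha with hb
          · rcases List.mem_append.mp ha with ha | ha
            · exact hsep a ha g (by omega) hg2
            · rw [List.mem_singleton] at ha; subst ha; exact hmono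
          · exact hsep a ha g (by omega) hg2
        obtain ⟨hpw2, hmem2⟩ := ih (h + 1) _ (by omega) (by omega) hacc' hsep'
        refine ⟨hpw2, fun x => ?_⟩
        rw [hmem2 x]
        constructor
        · rintro (hx | ⟨g, hg1, hg2, hg3, hg4, hg5⟩)
          · split_ifs at hx with hb
            · rcases List.mem_append.mp hx with hx | hx
              · exact Or.inl hx
              · rw [List.mem_singleton] at hx
                exact Or.inr ⟨h, le_rfl, hcond, by omega, hb, hx⟩
            · exact Or.inl hx
          · exact Or.inr ⟨g, by omega, hg2, hg3, hg4, hg5⟩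
        · rintro (hx | ⟨g, hg1, hg2, hg3, hg4, hg5⟩)
          · exact Or.inl (by split_ifs <;> simp [hx])
          · rcases eq_or_lt_of_le hg1 with he | hlt'
            · subst he
              refine Or.inl ?_
              rw [if_pos hg4]
              subst hg5
              simp
            · exact Or.inr ⟨g, by omega, hg2, hg3, hg4, hg5⟩
    · rw [innerFor, if_neg hcond]
      exact ⟨hpw, fun x => ⟨fun hx => Or.inl hx, fun hx => by
        rcases hx with hx | ⟨g, hg1, hg2, _⟩
        · exact hx
        · omega⟩⟩

theorem int_le_pow_pred (M : Int) (hM : 1 ≤ M) : M ≤ (10:Int) ^ (M.toNat - 1) := by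
  have h1 : M.toNat - 1 < 10 ^ (M.toNat - 1) := Nat.lt_pow_self (by norm_num)
  have h2 : ((M.toNat - 1 : ℕ) : Int) < ((10 ^ (M.toNat - 1) : ℕ) : Int) := by exact_mod_cast h1
  have h3 : ((10 ^ (M.toNat - 1) : ℕ) : Int) = (10:Int) ^ (M.toNat - 1) := by push_cast; ring
  omega


theorem outer_spec (max_num : Int) :
    ∀ (n : ℕ) (L : Int) (acc : List Int),
      (max_num + 1 - L).toNat ≤ n → 1 ≤ L →
      List.Pairwise (· < ·) acc →
      (∀ a ∈ acc, a < (10:Int) ^ (L.toNat - 1)) →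
      List.Pairwise (· < ·) (outerWhile max_num L acc) ∧
      (∀ x, x ∈ outerWhile max_num L acc ↔
        x ∈ acc ∨ ∃ L' : Int, L ≤ L' ∧ (10:Int) ^ (L'.toNat - 1) ≤ max_num ∧
          ∃ g : Int, (10:Int) ^ ((L'.toNat + 1) / 2 - 1) ≤ g ∧ g < (10:Int) ^ ((L'.toNat + 1) / 2) ∧
            pfunI L' g ≤ max_num ∧ binPal (pfunI L' g) = true ∧ x = pfunI L' g) := by
  intro n
  induction n with
  | zero =>
    intro L acc hn hL hpw hbd
    have hgt : max_num < L := by omega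
    have hcond : ¬ ((10 : Int) ^ (L - 1).toNat ≤ max_num) := by
      have := int_le_pow_pred L hL
      have he : (L - 1).toNat = L.toNat - 1 := by omega
      rw [he]; omega
    rw [outerWhile, if_neg hcond]
    refine ⟨hpw, fun x => ⟨fun hx => Or.inl hx, fun hx => ?_⟩⟩
    rcases hx with hx | ⟨L', hL1, hL2, _⟩
    · exact hx
    · exfalso
      have := int_le_pow_pred L' (by omega)
      omega
  | succ n ih =>
    intro L acc hn hL hpw hbd
    by_cases hcond : (10 : Int) ^ (L - 1).toNat ≤ max_num
    · rw [outerWhile, if_pos hcond]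
      simp only []
      have he : (L - 1).toNat = L.toNat - 1 := by omega
      set half := PySem.Int.floordiv (L + 1) 2 with hhalf
      have hhv : half = (L + 1) / 2 := PySem.Int.floordiv_eq_ediv_of_pos (by omega)
      have hh1 : half.toNat = (L.toNat + 1) / 2 := by omega
      have hh2 : (half - 1).toNat = (L.toNat + 1) / 2 - 1 := by omega
      have hsep : ∀ a ∈ acc, ∀ g : Int,
          (10 : Int) ^ (half - 1).toNat ≤ g → g < (10 : Int) ^ half.toNat → a < pfunI L g := by
        intro a ha g hg1 hg2
        have hb := boundsI L g hL (by rw [← hh2]; exact hg1) (by rw [← hh1]; exact hg2)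
        have := hbd a ha
        omega
      obtain ⟨hpw1, hmem1⟩ := innerFor_spec max_num L ((10 : Int) ^ half.toNat) hL
        (by rw [hh1]) ((10 : Int) ^ half.toNat - (10 : Int) ^ (half - 1).toNat).toNat
        ((10 : Int) ^ (half - 1).toNat) acc le_rfl (by rw [hh2]) hpw hsep
      have haccbd : ∀ a ∈ innerFor max_num L ((10 : Int) ^ half.toNat)
          ((10 : Int) ^ (half - 1).toNat) acc, a < (10 : Int) ^ ((L + 1).toNat - 1) := by
        intro a ha
        rcases (hmem1 a).mp ha with ha | ⟨g, hg1, hg2, _, _, hg5⟩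
        · have h10 : (10:Int) ^ (L.toNat - 1) ≤ (10:Int) ^ ((L+1).toNat - 1) :=
            pow_le_pow_right₀ (by norm_num) (by omega)
          have := hbd a ha
          omega
        · subst hg5
          have hb := boundsI L g hL (by rw [← hh2]; exact hg1) (by rw [← hh1]; exact hg2)
          have he2 : (L + 1).toNat - 1 = L.toNat := by omega
          rw [he2]
          exact hb.2
      obtain ⟨hpw2, hmem2⟩ := ih (L + 1)
        (innerFor max_num L ((10 : Int) ^ half.toNat) ((10 : Int) ^ (half - 1).toNat) acc)
        (by
          have := int_le_pow_pred L hL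
          rw [he] at hcond
          omega)
        (by omega) hpw1 haccbd
      refine ⟨hpw2, fun x => ?_⟩
      rw [hmem2 x]
      constructor
      · rintro (hx | ⟨L', hL1, hL2, g, hg⟩)
        · rcases (hmem1 x).mp hx with hx | ⟨g, hg1, hg2, hg3, hg4, hg5⟩
          · exact Or.inl hx
          · exact Or.inr ⟨L, le_rfl, by rw [← he]; exact hcond,
              g, by rw [← hh2]; exact hg1, by rw [← hh1]; exact hg2, hg3, hg4, hg5⟩
        · exact Or.inr ⟨L', by omega, hL2, g, hg⟩
      · rintro (hx | ⟨L', hL1, hL2, g, hg1, hg2, hg3, hg4, hg5⟩)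
        · exact Or.inl ((hmem1 x).mpr (Or.inl hx))
        · rcases eq_or_lt_of_le hL1 with heq | hlt'
          · subst heq
            exact Or.inl ((hmem1 x).mpr (Or.inr
              ⟨g, by rw [hh2]; exact hg1, by rw [hh1]; exact hg2, hg3, hg4, hg5⟩))
          · exact Or.inr ⟨L', by omega, hL2, g, hg1, hg2, hg3, hg4, hg5⟩
    · rw [outerWhile, if_neg hcond]
      refine ⟨hpw, fun x => ⟨fun hx => Or.inl hx, fun hx => ?_⟩⟩
      rcases hx with hx | ⟨L', hL1, hL2, _⟩
      · exact hx
      · exfalso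
        apply hcond
        have he : (L - 1).toNat = L.toNat - 1 := by omega
        have hmono : (10:Int) ^ (L.toNat - 1) ≤ (10:Int) ^ (L'.toNat - 1) :=
          pow_le_pow_right₀ (by norm_num) (by omega)
        rw [he]; omega

theorem sorted_ext : ∀ (l1 l2 : List Int), List.Pairwise (· < ·) l1 →
    List.Pairwise (· < ·) l2 → (∀ x, x ∈ l1 ↔ x ∈ l2) → l1 = l2 := by
  intro l1
  induction l1 with
  | nil =>
    intro l2 _ _ hm
    cases l2 with
    | nil => rfl
    | cons b u => exact absurd ((hm b).mpr (by simp)) (by simp)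
  | cons a t ih =>
    intro l2 h1 h2 hm
    cases l2 with
    | nil => exact absurd ((hm a).mp (by simp)) (by simp)
    | cons b u =>
      have hab : a = b := by
        rcases List.mem_cons.mp ((hm a).mp (by simp)) with h | ha
        · exact h
        · rcases List.mem_cons.mp ((hm b).mpr (by simp)) with h | hb
          · exact h.symm
          · have h3 := (List.pairwise_cons.mp h1).1 b hb
            have h4 := (List.pairwise_cons.mp h2).1 a ha
            omega
      subst hab
      have hmt : ∀ x, x ∈ t ↔ x ∈ u := by
        intro x
        constructor
        · intro hx
          have hax := (List.pairwise_cons.mp h1).1 x hx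
          rcases List.mem_cons.mp ((hm x).mp (List.mem_cons_of_mem a hx)) with h | h
          · omega
          · exact h
        · intro hx
          have hax := (List.pairwise_cons.mp h2).1 x hx
          rcases List.mem_cons.mp ((hm x).mpr (List.mem_cons_of_mem a hx)) with h | h
          · omega
          · exact h
      rw [ih u (List.pairwise_cons.mp h1).2 (List.pairwise_cons.mp h2).2 hmt]

theorem A_pairwise (max_num : Int) :
    List.Pairwise (· < ·) (decimal_binary_palindromes max_num) := by
  rw [A_eq_filter]
  exact List.Pairwise.sublist List.filter_sublist (PySem.List.pairwise_lt_pyRange_one 1 (max_num + 1))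

theorem A_mem (max_num x : Int) :
    x ∈ decimal_binary_palindromes max_num ↔
      1 ≤ x ∧ x ≤ max_num ∧ pal 10 x.toNat ∧ pal 2 x.toNat := by
  rw [A_eq_filter, List.mem_filter, PySem.List.mem_pyRange_one]
  constructor
  · rintro ⟨⟨hx1, hx2⟩, hc⟩
    obtain ⟨hp1, hp2⟩ := (condA_iff x hx1).mp hc
    exact ⟨hx1, by omega, hp1, hp2⟩
  · rintro ⟨hx1, hx2, hp1, hp2⟩
    exact ⟨⟨hx1, by omega⟩, (condA_iff x hx1).mpr ⟨hp1, hp2⟩⟩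

theorem alt_pairwise (max_num : Int) :
    List.Pairwise (· < ·) (decimal_binary_palindromes_alt max_num) := by
  rw [decimal_binary_palindromes_alt]
  exact (outer_spec max_num (max_num + 1 - 1).toNat 1 [] le_rfl le_rfl
    (List.Pairwise.nil) (by simp)).1

theorem alt_mem (max_num x : Int) :
    x ∈ decimal_binary_palindromes_alt max_num ↔
      1 ≤ x ∧ x ≤ max_num ∧ pal 10 x.toNat ∧ pal 2 x.toNat := by
  rw [decimal_binary_palindromes_alt]
  rw [(outer_spec max_num (max_num + 1 - 1).toNat 1 [] le_rfl le_rfl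
    (List.Pairwise.nil) (by simp)).2 x]
  simp only [List.not_mem_nil, false_or]
  constructor
  · rintro ⟨L', hL1, hL2, g, hg1, hg2, hg3, hg4, hg5⟩
    have hpow1 : (1:Int) ≤ (10:Int) ^ ((L'.toNat + 1) / 2 - 1) := one_le_pow₀ (by norm_num)
    have hg : 1 ≤ g := le_trans hpow1 hg1
    have hb := boundsI L' g hL1 hg1 hg2
    have hpow2 : (1:Int) ≤ (10:Int) ^ (L'.toNat - 1) := one_le_pow₀ (by norm_num)
    have hx1 : 1 ≤ x := by omega
    refine ⟨hx1, by omega, ?_, ?_⟩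
    · rw [hg5, pfunI_eq L' g hL1 hg]
      have hc : ((pval L'.toNat g.toNat : ℕ) : Int).toNat = pval L'.toNat g.toNat := by omega
      rw [hc]
      exact pal_pval L'.toNat g.toNat (by omega)
    · rw [← binPal_iff x hx1, hg5]
      exact hg4
  · rintro ⟨hx1, hx2, hp1, hp2⟩
    set m := x.toNat with hm
    have hm1 : 0 < m := by omega
    set n := (Nat.digits 10 m).length with hn
    have hnpos : 0 < n := by
      rw [hn]
      simp [List.length_pos_iff, Nat.digits_ne_nil_iff_ne_zero.mpr (by omega : m ≠ 0)]
    obtain ⟨hs1, hs2, hs3⟩ := surj_pval m hm1 hp1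
    rw [← hn] at hs1 hs2 hs3
    set hh := Nat.ofDigits 10 ((Nat.digits 10 m).drop (n - (n + 1) / 2)) with hhh
    have hnn : ((n : Int)).toNat = n := Int.toNat_natCast n
    have hhp : (1:ℕ) ≤ hh := le_trans (Nat.one_le_pow _ _ (by norm_num)) hs1
    have hkey : pfunI (n : Int) (hh : Int) = x := by
      rw [pfunI_eq (n : Int) (hh : Int) (by omega) (by exact_mod_cast hhp), hnn,
        Int.toNat_natCast, hs3]
      omega
    refine ⟨(n : Int), by omega, ?_, (hh : Int), ?_, ?_, ?_, ?_, ?_⟩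
    · rw [hnn]
      have h1 := base_pow_pred_le 10 m (by norm_num) hm1
      rw [← hn] at h1
      have h2 : (((10:ℕ) ^ (n - 1) : ℕ) : Int) = (10:Int) ^ (n - 1) := by push_cast; ring
      omega
    · rw [hnn]
      exact_mod_cast hs1
    · rw [hnn]
      exact_mod_cast hs2
    · rw [hkey]; omega
    · rw [hkey, binPal_iff x hx1]; exact hp2
    · rw [hkey]

theorem main_equiv (max_num : Int) :
    decimal_binary_palindromes max_num = decimal_binary_palindromes_alt max_num :=
  sorted_ext _ _ (A_pairwise max_num) (alt_pairwise max_num)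
    (fun x => by rw [A_mem, alt_mem])

-- ===== VERDICT (by name: the statement is the Claim_ definition above) =====
theorem decimal_binary_palindromes_spec : Claim_equal_decimal_binary_palindromes := by
  intro max_num _
  unfold Spec_decimal_binary_palindromes
  exact main_equiv max_num
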